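-- pv_equiv track=rewrite | github.com/VinayBU14/encrypted-traffic-analyzer | src/dashboard/views/live_capture_view.py | _default_iface_index
-- ===== SOURCE A (Python) =====
-- def _default_iface_index(iface_list: list[str]) -> int:
--     """Pick Wi-Fi / WLAN as default, then Ethernet, then index 0."""
--     for i, name in enumerate(iface_list):
--         lower = name.lower()
--         if "wi-fi" in lower or "wlan" in lower or "wireless" in lower:
--             return i
--     for i, name in enumerate(iface_list):
--         lower = name.lower()
--         if "ethernet" in lower or "local area" in lower:
--             return i
--     return 0
-- ===== SOURCE B (Python) =====
-- def _default_iface_index(iface_list: list[str]) -> int: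
--     """Pick Wi-Fi / WLAN as default, then Ethernet, then index 0 (single pass)."""
--     wifi_idx = None
--     eth_idx = None
--     for i, name in enumerate(iface_list):
--         lower = name.lower()
--         if wifi_idx is None and ("wi-fi" in lower or "wlan" in lower or "wireless" in lower):
--             wifi_idx = i
--         elif eth_idx is None and ("ethernet" in lower or "local area" in lower):
--             eth_idx = i
--     if wifi_idx is not None:
--         return wifi_idx
--     if eth_idx is not None:
--         return eth_idx
--     return 0
-- ===== Notes on version B (the rewrite author's own statement) =====
-- stated objective: alternative
-- what changed: Replaced A's two sequential early-return scans over the list with one single pass that maintains both candidate indices (first wifi match, first ethernet match) and resolves the priority after the loop.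
import Mathlib
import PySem

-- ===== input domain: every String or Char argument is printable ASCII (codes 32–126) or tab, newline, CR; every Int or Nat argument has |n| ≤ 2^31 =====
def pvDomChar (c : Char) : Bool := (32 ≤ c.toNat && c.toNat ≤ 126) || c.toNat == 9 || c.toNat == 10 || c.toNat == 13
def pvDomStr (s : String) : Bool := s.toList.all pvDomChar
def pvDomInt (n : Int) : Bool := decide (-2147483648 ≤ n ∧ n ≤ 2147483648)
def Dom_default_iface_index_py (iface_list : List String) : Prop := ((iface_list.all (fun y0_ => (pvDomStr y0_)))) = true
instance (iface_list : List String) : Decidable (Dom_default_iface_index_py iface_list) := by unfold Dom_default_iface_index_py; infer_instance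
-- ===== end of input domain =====

-- ===== PORT A =====
-- B changes the decomposition: one pass holding both candidate indices instead of A's two early-return scans.
def pvWifi (lo : String) : Bool :=
  PySem.Str.isIn "wi-fi" lo || PySem.Str.isIn "wlan" lo || PySem.Str.isIn "wireless" lo

def pvEth (lo : String) : Bool :=
  PySem.Str.isIn "ethernet" lo || PySem.Str.isIn "local area" lo

-- early-return loop of A: first index where the predicate holds on the lowercased name
def pvScanA (p : String → Bool) : List String → Int → Option Int
  | [], _ => none
  | name :: rest, i => if p (PySem.Str.lower name) then some i else pvScanA p rest (i + 1)

def default_iface_index_py (iface_list : List String) : Int :=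
  match pvScanA pvWifi iface_list 0 with
  | some i => i
  | none =>
    match pvScanA pvEth iface_list 0 with
    | some i => i
    | none => 0

-- ===== PORT B =====
-- loop body of B: state = (wifi_idx, eth_idx, i)
def pvStepB (acc : Option Int × Option Int × Int) (name : String) : Option Int × Option Int × Int :=
  let w := acc.1
  let e := acc.2.1
  let i := acc.2.2
  let lo := PySem.Str.lower name
  if w.isNone && pvWifi lo then (some i, e, i + 1)
  else if e.isNone && pvEth lo then (w, some i, i + 1)
  else (w, e, i + 1)

-- the returns after B's loop
def pvFinishB (st : Option Int × Option Int × Int) : Int :=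
  match st.1 with
  | some wi => wi
  | none =>
    match st.2.1 with
    | some ei => ei
    | none => 0

def default_iface_index_py_alt (iface_list : List String) : Int :=
  pvFinishB (iface_list.foldl pvStepB (none, none, 0))

-- ===== PRECONDITION & SPEC =====
def Spec_default_iface_index_py (iface_list : List String) (out : Int) : Prop := out = default_iface_index_py_alt iface_list
instance (iface_list : List String) (out : Int) : Decidable (Spec_default_iface_index_py iface_list out) := by unfold Spec_default_iface_index_py; infer_instance

-- ===== CLAIM (what is proved, stated in full; the proofs are below) =====
def Claim_equal_default_iface_index_py : Prop := ∀ (iface_list : List String), Dom_default_iface_index_py iface_list → Spec_default_iface_index_py iface_list (default_iface_index_py iface_list)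

-- ===== LEMMAS AND PROOFS =====

-- once wifi_idx is set B's fold never changes it and the result is that index
theorem pvFoldB_some (xs : List String) (wi : Int) (e : Option Int) (i : Int) :
    pvFinishB (xs.foldl pvStepB (some wi, e, i)) = wi := by
  induction xs generalizing e i with
  | nil => rfl
  | cons x xs ih =>
    simp only [List.foldl_cons, pvStepB, Option.isNone_some, Bool.false_and]
    rw [if_neg (by decide)]
    split
    · exact ih _ _
    · exact ih _ _

-- with wifi_idx still unset, B's fold computes A's two-scan answer (e holds the eth candidate so far)
theorem pvFoldB_none (xs : List String) (e : Option Int) (i : Int) :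
    pvFinishB (xs.foldl pvStepB (none, e, i)) =
      (match pvScanA pvWifi xs i with
       | some j => j
       | none =>
         match e with
         | some ei => ei
         | none =>
           match pvScanA pvEth xs i with
           | some j => j
           | none => 0) := by
  induction xs generalizing e i with
  | nil => cases e <;> rfl
  | cons x xs ih =>
    simp only [List.foldl_cons, pvStepB, pvScanA, Option.isNone_none, Bool.true_and]
    by_cases hw : pvWifi (PySem.Str.lower x)
    · simp only [hw, if_true]
      exact pvFoldB_some xs i e (i + 1)
    · simp only [hw, if_false, Bool.false_eq_true]
      cases e with
      | some ei =>
        simp only [Option.isNone_some, Bool.false_and]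
        rw [if_neg (by decide)]
        rw [ih]
      | none =>
        by_cases he : pvEth (PySem.Str.lower x)
        · simp only [he, Option.isNone_none, Bool.true_and, if_true]
          rw [ih]
        · simp only [he, Option.isNone_none, Bool.true_and, if_false, Bool.false_eq_true]
          rw [ih]

-- ===== VERDICT (by name: the statement is the Claim_ definition above) =====
theorem default_iface_index_py_spec : Claim_equal_default_iface_index_py := by
  intro xs _
  unfold Spec_default_iface_index_py default_iface_index_py default_iface_index_py_alt
  rw [pvFoldB_none xs none 0]
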